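-- pv_equiv track=rewrite | github.com/TalesLimaOliveira/ifb_ds | atividades/lista_01-090425/10.py | best_exam
-- ===== SOURCE A (Python) =====
-- def best_exam(scores):
--     if not scores or not scores[0]:
--         return None  # Lista vazia ou mal formatada
--
--     # Supondo que todas as linhas têm o mesmo tamanho
--     num_exams = len(scores[0])
--     total_by_exam = [0] * num_exams
--
--     # Soma das colunas
--     for row in scores:
--         for i in range(num_exams):
--             total_by_exam[i] += row[i]
--
--     # Encontrar o índice da prova com maior soma
--     max_index = total_by_exam.index(max(total_by_exam))
--     return max_index  # ou retornar "Prova 1", "Prova 2", etc.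
-- ===== SOURCE B (Python) =====
-- def best_exam(scores):
--     if not scores or not scores[0]:
--         return None  # empty or malformed input
--     # single keyed argmax over columns: running best index and best column sum,
--     # no totals list, no .index / max passes
--     best, best_sum = 0, sum(row[0] for row in scores)
--     for i in range(1, len(scores[0])):
--         s = sum(row[i] for row in scores)
--         if s > best_sum:
--             best, best_sum = i, s
--     return best
-- ===== Notes on version B (the rewrite author's own statement) =====
-- stated objective: simpler
-- what changed: Replaces the materialized per-column totals list followed by max() and .index() passes with a single running-argmax loop over column indices keeping only (best index, best sum).
import Mathlib
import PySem

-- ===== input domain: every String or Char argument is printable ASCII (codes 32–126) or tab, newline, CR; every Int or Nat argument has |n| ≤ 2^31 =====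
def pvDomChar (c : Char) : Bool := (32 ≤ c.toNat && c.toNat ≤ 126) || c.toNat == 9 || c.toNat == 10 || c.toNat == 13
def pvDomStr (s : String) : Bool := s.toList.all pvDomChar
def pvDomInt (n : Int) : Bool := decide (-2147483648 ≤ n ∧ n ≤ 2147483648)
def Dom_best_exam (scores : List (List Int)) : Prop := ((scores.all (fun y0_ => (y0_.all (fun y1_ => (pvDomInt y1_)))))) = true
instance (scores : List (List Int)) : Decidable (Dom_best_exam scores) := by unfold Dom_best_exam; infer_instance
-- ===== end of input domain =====

-- B replaces A's totals list + max() + .index() with one running-argmax loop over columns (simpler, O(1) extra space).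

-- ===== PORT A =====
def best_exam (scores : List (List Int)) : Option Int :=
  match scores with
  | [] => none
  | r0 :: _ =>
    if r0.length = 0 then none
    else
      -- total_by_exam[i] += row[i] ; pyGetD/pySetD are exact under Pre_ (indices in range)
      let totals := scores.foldl
        (fun tot row =>
          (PySem.List.pyRange 0 (r0.length : Int) 1).foldl
            (fun t i =>
              PySem.List.pySetD t i (PySem.List.pyGetD t i 0 + PySem.List.pyGetD row i 0))
            tot)
        (List.replicate r0.length (0 : Int))
      -- total_by_exam.index(max(total_by_exam)); both always succeed (totals nonempty)
      match PySem.List.index? totals ((PySem.List.max? totals (fun x => x)).getD 0) with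
      | some k => some (k : Int)
      | none => none

-- ===== PORT B =====
-- s = sum(row[i] for row in scores)
def pvColSum (scores : List (List Int)) (i : Int) : Int :=
  scores.foldl (fun s row => s + PySem.List.pyGetD row i 0) 0

def best_exam_alt (scores : List (List Int)) : Option Int :=
  match scores with
  | [] => none
  | r0 :: _ =>
    if r0.length = 0 then none
    else
      let p := (PySem.List.pyRange 1 (r0.length : Int) 1).foldl
        (fun (p : Int × Int) i =>
          let s := pvColSum scores i
          if p.2 < s then (i, s) else p)
        ((0 : Int), pvColSum scores 0)
      some p.1

-- ===== PRECONDITION & SPEC =====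
-- Pre_ excludes exactly the ragged inputs (some row shorter than the first row) on which the
-- Python A raises IndexError; Python B raises there too.
def Pre_best_exam (scores : List (List Int)) : Prop :=
  ∀ row ∈ scores, (scores.headD []).length ≤ row.length
instance (scores : List (List Int)) : Decidable (Pre_best_exam scores) := by unfold Pre_best_exam; infer_instance

def pvWitness_best_exam : List (List Int) := [[1, 2], [3, 0]]

def Spec_best_exam (scores : List (List Int)) (out : Option Int) : Prop := out = best_exam_alt scores
instance (scores : List (List Int)) (out : Option Int) : Decidable (Spec_best_exam scores out) := by unfold Spec_best_exam; infer_instance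

-- ===== CLAIM (what is proved, stated in full; the proofs are below) =====
def Claim_equal_best_exam : Prop := ∀ (scores : List (List Int)), Dom_best_exam scores → Pre_best_exam scores → Spec_best_exam scores (best_exam scores)

-- ===== LEMMAS AND PROOFS =====

-- the per-column key both programs compute
def pvKey (scores : List (List Int)) (j : Nat) : Int :=
  (scores.map (fun row => row.getD j 0)).sum

theorem pvColSum_natCast (scores : List (List Int)) (j : Nat) :
    pvColSum scores (j : Int) = pvKey scores j := by
  unfold pvColSum pvKey
  rw [PySem.List.foldl_add]
  simp

-- effect of the inner index loop (nodup index list, all in range)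
theorem pv_setfold (f : Nat → Int) :
    ∀ (l : List Nat) (tot : List Int), l.Nodup → (∀ k ∈ l, k < tot.length) →
      ((l.foldl (fun t k => t.set k (t.getD k 0 + f k)) tot).length = tot.length ∧
       ∀ j : Nat, (l.foldl (fun t k => t.set k (t.getD k 0 + f k)) tot).getD j 0 =
          if j ∈ l then tot.getD j 0 + f j else tot.getD j 0) := by
  intro l
  induction l with
  | nil => intro tot _ _; simp
  | cons i l ih =>
    intro tot hnd hin
    have hi : i < tot.length := hin i (by simp)
    have hnd' : l.Nodup := (List.nodup_cons.mp hnd).2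
    have hni : i ∉ l := (List.nodup_cons.mp hnd).1
    have hin' : ∀ k ∈ l, k < (tot.set i (tot.getD i 0 + f i)).length := by
      intro k hk; simpa using hin k (by simp [hk])
    obtain ⟨hlen, hget⟩ := ih (tot.set i (tot.getD i 0 + f i)) hnd' hin'
    constructor
    · rw [List.foldl_cons, hlen, List.length_set]
    · intro j
      rw [List.foldl_cons, hget j]
      by_cases hji : j = i
      · subst hji
        have hs : (tot.set j (tot.getD j 0 + f j)).getD j 0 = tot.getD j 0 + f j := by
          simp [List.getD_eq_getElem?_getD, hi]
        rw [if_neg hni, hs, if_pos List.mem_cons_self]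
      · have hs : (tot.set i (tot.getD i 0 + f i)).getD j 0 = tot.getD j 0 := by
          simp [List.getD_eq_getElem?_getD, Ne.symm hji]
        rw [hs]
        simp [List.mem_cons, hji]

-- effect of the row loop: totals accumulate the column sums
theorem pv_outer (n : Nat) :
    ∀ (rows : List (List Int)) (acc : List Int), acc.length = n →
      ((rows.foldl (fun tot row =>
          (List.range n).foldl (fun t k => t.set k (t.getD k 0 + row.getD k 0)) tot) acc).length = n ∧
       ∀ j : Nat, j < n →
        (rows.foldl (fun tot row =>
          (List.range n).foldl (fun t k => t.set k (t.getD k 0 + row.getD k 0)) tot) acc).getD j 0 =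
          acc.getD j 0 + pvKey rows j) := by
  intro rows
  induction rows with
  | nil => intro acc h; simp [pvKey, h]
  | cons row rows ih =>
    intro acc hacc
    obtain ⟨slen, sget⟩ := pv_setfold (fun k => row.getD k 0) (List.range n) acc
      (List.nodup_range) (by intro k hk; simpa [hacc] using List.mem_range.mp hk)
    obtain ⟨hlen, hget⟩ := ih ((List.range n).foldl (fun t k => t.set k (t.getD k 0 + row.getD k 0)) acc)
      (by rw [slen, hacc])
    refine ⟨by simpa using hlen, ?_⟩
    intro j hj
    rw [List.foldl_cons, hget j hj, sget j]
    simp [List.mem_range.mpr hj, pvKey, add_assoc]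

-- A's totals list is the list of column sums
theorem pv_totals (scores : List (List Int)) (n : Nat) :
    scores.foldl
        (fun tot row =>
          (PySem.List.pyRange 0 (n : Int) 1).foldl
            (fun t i =>
              PySem.List.pySetD t i (PySem.List.pyGetD t i 0 + PySem.List.pyGetD row i 0))
            tot)
        (List.replicate n (0 : Int))
      = (List.range n).map (pvKey scores) := by
  have hr : ∀ (row tot : List Int),
      (PySem.List.pyRange 0 (n : Int) 1).foldl
        (fun t i => PySem.List.pySetD t i (PySem.List.pyGetD t i 0 + PySem.List.pyGetD row i 0)) tot
      = (List.range n).foldl (fun t k => t.set k (t.getD k 0 + row.getD k 0)) tot := by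
    intro row tot
    rw [PySem.List.pyRange_zero_nat, List.foldl_map]
    simp
  simp only [hr]
  obtain ⟨hlen, hget⟩ := pv_outer n scores (List.replicate n (0 : Int)) (by simp)
  apply List.ext_getElem (by rw [hlen]; simp)
  intro j h1 h2
  have hj : j < n := by simpa using h2
  have := hget j hj
  rw [List.getD_eq_getElem?_getD, List.getElem?_eq_getElem h1] at this
  simpa [hj] using this

-- B's running argmax: result is the first index attaining the column maximum
theorem pv_argmax_inv (K : Int → Int) :
    ∀ n : Nat, 1 ≤ n →
      ∃ b : Nat, b < n ∧
        ((PySem.List.pyRange 1 (n : Int) 1).foldl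
            (fun (p : Int × Int) i => if p.2 < K i then (i, K i) else p)
            ((0 : Int), K 0))
          = ((b : Int), K (b : Int)) ∧
        (∀ j : Nat, j < n → K (j : Int) ≤ K (b : Int)) ∧
        (∀ j : Nat, j < b → K (j : Int) < K (b : Int)) := by
  intro n hn
  induction n with
  | zero => omega
  | succ n ih =>
    by_cases h1 : 1 ≤ n
    · obtain ⟨b, hb, hfold, hmax, hstrict⟩ := ih h1
      have hsplit : PySem.List.pyRange 1 ((n + 1 : Nat) : Int) 1
          = PySem.List.pyRange 1 (n : Int) 1 ++ [(n : Int)] := by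
        have := PySem.List.pyRange_one_succ_right (a := 1) (b := (n : Int)) (by exact_mod_cast h1)
        push_cast
        exact this
      rw [hsplit, List.foldl_append, hfold]
      by_cases hlt : K (b : Int) < K (n : Int)
      · refine ⟨n, by omega, by simp [hlt], ?_, ?_⟩
        · intro j hj
          by_cases hjn : j < n
          · exact le_of_lt (lt_of_le_of_lt (hmax j hjn) hlt)
          · have : j = n := by omega
            simp [this]
        · intro j hj
          exact lt_of_le_of_lt (hmax j hj) hlt
      · refine ⟨b, by omega, by simp [hlt], ?_, hstrict⟩
        intro j hj
        by_cases hjn : j < n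
        · exact hmax j hjn
        · have : j = n := by omega
          rw [this]; exact not_lt.mp hlt
    · have hn0 : n = 0 := by omega
      subst hn0
      refine ⟨0, by omega, ?_, ?_, by omega⟩
      · rw [show ((0 + 1 : Nat) : Int) = 1 by norm_num,
          PySem.List.pyRange_one_eq_nil (le_refl 1)]
        simp
      · intro j hj
        have : j = 0 := by omega
        simp [this]

-- A's max-then-index equals the first index attaining the maximum
theorem pv_index_max (key : Nat → Int) (n b : Nat) (hb : b < n)
    (hmax : ∀ j : Nat, j < n → key j ≤ key b)
    (hstrict : ∀ j : Nat, j < b → key j < key b) :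
    PySem.List.index? ((List.range n).map key)
        ((PySem.List.max? ((List.range n).map key) (fun x => x)).getD 0)
      = some b := by
  set t := (List.range n).map key with ht
  have hbmem : key b ∈ t := List.mem_map.mpr ⟨b, List.mem_range.mpr hb, rfl⟩
  have htne : t ≠ [] := by intro h; rw [h] at hbmem; exact absurd hbmem (List.not_mem_nil)
  obtain ⟨m, hm⟩ := Option.ne_none_iff_exists'.mp
    (fun h => htne ((PySem.List.max?_eq_none_iff t (fun x => x)).mp h))
  have hmmem : m ∈ t := PySem.List.max?_mem hm
  have hmval : m = key b := by
    obtain ⟨j, hj, hjm⟩ := List.mem_map.mp hmmem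
    have h1 : m ≤ key b := hjm ▸ hmax j (List.mem_range.mp hj)
    have h2 : key b ≤ m := PySem.List.max?_isMax hm (key b) hbmem
    exact le_antisymm h1 h2
  rw [hm]
  simp only [Option.getD_some, hmval]
  rw [PySem.List.index?_eq_some_iff t (key b) b]
  refine ⟨(List.range b).map key, (List.range' (b + 1) (n - b - 1)).map key, ?_, by simp, ?_⟩
  · rw [ht]
    have hsplit : List.range n = List.range b ++ b :: List.range' (b + 1) (n - b - 1) := by
      rw [List.range_eq_range', List.range_eq_range']
      have h2 : List.range' b (n - b) = b :: List.range' (b + 1) (n - b - 1) := by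
        have hnb : n - b = (n - b - 1) + 1 := by omega
        rw [hnb, List.range'_succ]
        simp
      rw [← h2]
      have h3 := List.range'_append (s := 0) (m := b) (n := n - b) (step := 1)
      simp only [Nat.zero_add, Nat.one_mul] at h3
      rw [h3]
      congr 1
      omega
    rw [hsplit]
    simp
  · intro hmem
    obtain ⟨j, hj, hjb⟩ := List.mem_map.mp hmem
    exact absurd hjb (ne_of_lt (hstrict j (List.mem_range.mp hj)))

-- ===== VERDICT (by name: the statement is the Claim_ definition above) =====
theorem best_exam_spec : Claim_equal_best_exam := by
  intro scores _hdom _hpre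
  unfold Spec_best_exam
  match scores with
  | [] => rfl
  | r0 :: rest =>
    unfold best_exam best_exam_alt
    by_cases h0 : r0.length = 0
    · simp [h0]
    · simp only [h0, if_false]
      have hn : 1 ≤ r0.length := Nat.one_le_iff_ne_zero.mpr h0
      obtain ⟨b, hb, hfold, hmax, hstrict⟩ :=
        pv_argmax_inv (pvColSum (r0 :: rest)) r0.length hn
      rw [pv_totals (r0 :: rest) r0.length]
      -- translate the invariant to the Nat-indexed key
      have hmax' : ∀ j : Nat, j < r0.length → pvKey (r0 :: rest) j ≤ pvKey (r0 :: rest) b := by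
        intro j hj
        rw [← pvColSum_natCast, ← pvColSum_natCast]; exact hmax j hj
      have hstrict' : ∀ j : Nat, j < b → pvKey (r0 :: rest) j < pvKey (r0 :: rest) b := by
        intro j hj
        rw [← pvColSum_natCast, ← pvColSum_natCast]; exact hstrict j hj
      rw [pv_index_max (pvKey (r0 :: rest)) r0.length b hb hmax' hstrict']
      simp [hfold]
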